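-- pv_equiv track=rewrite | github.com/vRayzix/PythonProject2 | tp5/chaine.py | premier_wagon
-- ===== SOURCE A (Python) =====
-- def taille_chaine(T):
--     t = 0
--     try:
--         while True:
--             T[t]
--             t += 1
--     except IndexError:
--         return t
--
-- def premier_wagon(T):
--     mot = "wagon"
--     t = taille_chaine(T)
--     lm = 5
--
--     for i in range(t - lm + 1):
--         j = 0
--         while j < lm and T[i + j] == mot[j]:
--             j += 1
--         if j == lm:
--             return i
--
--     return -1
-- ===== SOURCE B (Python) =====
-- def premier_wagon(T):
--     # KMP-style automaton: "wagon" has 5 pairwise-distinct characters, so on a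
--     # mismatch the only possible restart is at state 1 (if the char is 'w') or 0.
--     mot = "wagon"
--     state = 0
--     i = 0
--     try:
--         while True:
--             c = T[i]
--             if c == mot[state]:
--                 state += 1
--                 if state == 5:
--                     return i - 4
--             elif c == mot[0]:
--                 state = 1
--             else:
--                 state = 0
--             i += 1
--     except IndexError:
--         return -1
-- ===== Notes on version B (the rewrite author's own statement) =====
-- stated objective: alternative
-- what changed: Replaces the length-bounded naive window scan (re-comparing up to 5 characters at every start index) by a single-pass KMP-style matching automaton: one state counter advanced per character, with mismatch fallback to state 1 or 0, valid because the characters of 'wagon' are pairwise distinct.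
import Mathlib
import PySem

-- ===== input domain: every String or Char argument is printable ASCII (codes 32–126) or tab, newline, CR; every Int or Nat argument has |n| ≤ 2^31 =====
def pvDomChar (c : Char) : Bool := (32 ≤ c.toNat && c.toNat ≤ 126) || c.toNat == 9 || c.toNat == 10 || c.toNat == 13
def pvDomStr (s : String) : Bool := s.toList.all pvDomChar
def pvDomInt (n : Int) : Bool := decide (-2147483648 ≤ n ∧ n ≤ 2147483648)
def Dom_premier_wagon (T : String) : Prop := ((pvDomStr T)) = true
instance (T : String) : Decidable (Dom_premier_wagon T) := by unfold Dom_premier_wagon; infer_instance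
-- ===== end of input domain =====

-- B replaces A's length-bounded naive window scan by a single-pass KMP-style matching
-- automaton (one state counter per character; the characters of "wagon" are pairwise
-- distinct, so mismatch falls back to state 1 or 0). Objective: alternative algorithm.

-- ===== PORT A =====
def motL : List Char := ['w', 'a', 'g', 'o', 'n']

-- while True: T[t]; t += 1  — fuel bounds the loop; with fuel = length+1 it is never exhausted
def tailleLoop (l : List Char) (t : Nat) (fuel : Nat) : Int :=
  match fuel with
  | 0 => (t : Int)
  | f + 1 =>
    match PySem.List.pyGet? l (t : Int) with
    | none => (t : Int)
    | some _ => tailleLoop l (t + 1) f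

def taille_chaine (T : String) : Int := tailleLoop T.toList 0 (T.toList.length + 1)

-- while j < lm and T[i+j] == mot[j]: j += 1  — fuel 5 suffices since j < 5 guards the loop
def innerA (l : List Char) (i : Int) (j : Nat) (fuel : Nat) : Nat :=
  match fuel with
  | 0 => j
  | f + 1 =>
    if j < 5 ∧ PySem.List.pyGet? l (i + (j : Int)) = PySem.List.pyGet? motL (j : Int) then
      innerA l i (j + 1) f
    else j

def loopA (l : List Char) (idxs : List Int) : Int :=
  match idxs with
  | [] => -1
  | i :: rest => if innerA l i 0 5 = 5 then i else loopA l rest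

def premier_wagon (T : String) : Int :=
  let t := taille_chaine T
  loopA T.toList (PySem.List.pyRange 0 (t - 5 + 1) 1)

-- ===== PORT B =====
-- mot[s] for the automaton state s; s is always in 0..4 so the Python indexing never raises
def motChar : Nat → Char
  | 0 => 'w'
  | 1 => 'a'
  | 2 => 'g'
  | 3 => 'o'
  | _ => 'n'

-- the while-True loop: state s, position i; running out of characters = IndexError = -1
def autoB : List Char → Int → Nat → Int
  | [], _, _ => -1
  | c :: rest, i, s =>
    if c = motChar s then
      if s + 1 = 5 then i - 4 else autoB rest (i + 1) (s + 1)
    else if c = 'w' then autoB rest (i + 1) 1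
    else autoB rest (i + 1) 0

def premier_wagon_alt (T : String) : Int := autoB T.toList 0 0

-- ===== PRECONDITION & SPEC =====
def Spec_premier_wagon (T : String) (out : Int) : Prop := out = premier_wagon_alt T
instance (T : String) (out : Int) : Decidable (Spec_premier_wagon T out) := by unfold Spec_premier_wagon; infer_instance

-- ===== CLAIM (what is proved, stated in full; the proofs are below) =====
def Claim_equal_premier_wagon : Prop := ∀ (T : String), Dom_premier_wagon T → Spec_premier_wagon T (premier_wagon T)

-- ===== LEMMAS AND PROOFS =====

-- the common specification: index of the first window equal to "wagon", if any
def first? : List Char → Option Nat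
  | [] => none
  | c :: t => if (c :: t).take 5 = motL then some 0 else (first? t).map (· + 1)

def encAt (k : Nat) : Option Nat → Int
  | none => -1
  | some m => ((k + m : Nat) : Int)

lemma first?_cons (c : Char) (t : List Char) :
    first? (c :: t) = if (c :: t).take 5 = motL then some 0 else (first? t).map (· + 1) := by
  rw [first?.eq_def]

lemma tailleLoop_eq (l : List Char) : ∀ (fuel t : Nat), l.length < t + fuel → t ≤ l.length →
    tailleLoop l t fuel = (l.length : Int) := by
  intro fuel
  induction fuel with
  | zero => intro t h1 h2; omega
  | succ f ih =>
    intro t h1 h2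
    unfold tailleLoop
    rcases Nat.lt_or_ge t l.length with h | h
    · have : PySem.List.pyGet? l (t : Int) = l[t]? := PySem.List.pyGet?_natCast l t
      rw [this, List.getElem?_eq_getElem h]
      exact ih (t + 1) (by omega) (by omega)
    · have ht : t = l.length := by omega
      subst ht
      have : PySem.List.pyGet? l (l.length : Int) = l[l.length]? := PySem.List.pyGet?_natCast l l.length
      rw [this, List.getElem?_eq_none (by omega)]

lemma taille_eq (T : String) : taille_chaine T = (T.toList.length : Int) := by
  unfold taille_chaine
  exact tailleLoop_eq T.toList _ 0 (by omega) (by omega)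

lemma innerA_eq5 (l : List Char) (k : Nat) :
    innerA l (k : Int) 0 5 = 5 ↔
      (l[k]? = some 'w' ∧ l[k+1]? = some 'a' ∧ l[k+2]? = some 'g' ∧
       l[k+3]? = some 'o' ∧ l[k+4]? = some 'n') := by
  have h0 : ((k : Int) + (0:Nat)) = ((k : Int)) := by push_cast; ring
  have h1 : ((k : Int) + (1:Nat)) = (((k+1 : Nat)) : Int) := by push_cast; ring
  have h2 : ((k : Int) + (2:Nat)) = (((k+2 : Nat)) : Int) := by push_cast; ring
  have h3 : ((k : Int) + (3:Nat)) = (((k+3 : Nat)) : Int) := by push_cast; ring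
  have h4 : ((k : Int) + (4:Nat)) = (((k+4 : Nat)) : Int) := by push_cast; ring
  simp only [innerA, h0, h1, h2, h3, h4, PySem.List.pyGet?_natCast, motL]
  norm_num
  split_ifs <;> simp_all

lemma take5_iff (xs : List Char) :
    xs.take 5 = motL ↔
      (xs[0]? = some 'w' ∧ xs[1]? = some 'a' ∧ xs[2]? = some 'g' ∧
       xs[3]? = some 'o' ∧ xs[4]? = some 'n') := by
  rcases xs with _ | ⟨a, _ | ⟨b, _ | ⟨c, _ | ⟨d, _ | ⟨e, rest⟩⟩⟩⟩⟩ <;>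
    simp [motL]

lemma first?_short (l : List Char) (h : l.length < 5) : first? l = none := by
  induction l with
  | nil => rfl
  | cons c t ih =>
    have hne : ¬ ((c :: t).take 5 = motL) := by
      intro hc
      rw [take5_iff] at hc
      have h4 := hc.2.2.2.2
      rw [List.getElem?_eq_none (by simp at h ⊢; omega)] at h4
      exact absurd h4 (by simp)
    rw [first?_cons, if_neg hne, ih (by simp at h ⊢; omega)]
    rfl

lemma head_ne (x : Char) (t : List Char) (hx : x ≠ 'w') :
    first? (x :: t) = (first? t).map (· + 1) := by
  have hne : ¬ ((x :: t).take 5 = motL) := by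
    intro hc
    rw [take5_iff] at hc
    simp at hc
    exact hx hc.1
  rw [first?_cons, if_neg hne]

-- A's scan loop computes the first-match spec
lemma main_loop (l : List Char) : ∀ (d k : Nat), l.length ≤ k + d →
    loopA l (PySem.List.pyRange (k : Int) ((l.length : Int) - 5 + 1) 1) =
      encAt k (first? (l.drop k)) := by
  intro d
  induction d with
  | zero =>
    intro k h
    rw [PySem.List.pyRange_one_eq_nil (by omega)]
    rw [first?_short _ (by simp; omega)]
    rfl
  | succ d ih =>
    intro k h
    by_cases hk : (k : Int) < (l.length : Int) - 5 + 1
    · rw [PySem.List.pyRange_one_cons hk]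
      unfold loopA
      have hdrop : ∀ j : Nat, (l.drop k)[j]? = l[k + j]? := by
        intro j; rw [List.getElem?_drop]
      have hklen : k < l.length := by omega
      rcases hd : l.drop k with _ | ⟨c, t⟩
      · have : (l.drop k).length = 0 := by rw [hd]; rfl
        simp at this; omega
      by_cases hmatch : innerA l (k : Int) 0 5 = 5
      · rw [if_pos hmatch]
        rw [innerA_eq5] at hmatch
        have htake : (l.drop k).take 5 = motL := by
          rw [take5_iff]; simp only [hdrop]; exact hmatch
        rw [hd] at htake
        show (k : Int) = encAt k (first? (c :: t))
        rw [first?_cons, if_pos htake]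
        simp [encAt]
      · rw [if_neg hmatch]
        have htake : (l.drop k).take 5 ≠ motL := by
          intro hc
          rw [take5_iff] at hc
          simp only [hdrop] at hc
          rw [innerA_eq5] at hmatch
          exact hmatch hc
        rw [hd] at htake
        have ht : t = l.drop (k + 1) := by
          have h' : (l.drop k).tail = l.drop (k + 1) := List.tail_drop
          rw [hd] at h'; simpa using h'
        have hrec : loopA l (PySem.List.pyRange ((k : Int) + 1) ((l.length : Int) - 5 + 1) 1)
            = encAt (k + 1) (first? (l.drop (k + 1))) := by
          have hcast : (k : Int) + 1 = ((k + 1 : Nat) : Int) := by push_cast; ring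
          rw [hcast]
          exact ih (k + 1) (by omega)
        rw [hrec]
        have hstep : first? (c :: t) = (first? t).map (· + 1) := by
          rw [first?_cons, if_neg htake]
        rw [hstep, ← ht]
        cases first? t <;> simp [encAt]
        omega
    · rw [PySem.List.pyRange_one_eq_nil (by omega)]
      rw [first?_short _ (by simp; omega)]
      rfl

-- skipping a matched proper prefix of "wagon": the prefix contains no match start
lemma skip_prefix (s : Nat) (hs1 : 1 ≤ s) (hs4 : s ≤ 4) (c : Char) (hc : c ≠ motChar s)
    (rest : List Char) :
    first? (motL.take s ++ c :: rest) = (first? (c :: rest)).map (· + s) := by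
  interval_cases s
  · -- s = 1
    have hne : ¬ (('w' :: c :: rest).take 5 = motL) := by
      rw [take5_iff]; intro h
      exact hc (by simpa [motChar] using h.2.1)
    show first? ('w' :: c :: rest) = (first? (c :: rest)).map (· + 1)
    rw [first?_cons, if_neg hne]
  · -- s = 2
    have hne : ¬ (('w' :: 'a' :: c :: rest).take 5 = motL) := by
      rw [take5_iff]; intro h
      exact hc (by simpa [motChar] using h.2.2.1)
    show first? ('w' :: 'a' :: c :: rest) = (first? (c :: rest)).map (· + 2)
    rw [first?_cons, if_neg hne, head_ne 'a' _ (by decide)]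
    cases first? (c :: rest) <;> simp
  · -- s = 3
    have hne : ¬ (('w' :: 'a' :: 'g' :: c :: rest).take 5 = motL) := by
      rw [take5_iff]; intro h
      exact hc (by simpa [motChar] using h.2.2.2.1)
    show first? ('w' :: 'a' :: 'g' :: c :: rest) = (first? (c :: rest)).map (· + 3)
    rw [first?_cons, if_neg hne, head_ne 'a' _ (by decide), head_ne 'g' _ (by decide)]
    cases first? (c :: rest) <;> simp
  · -- s = 4
    have hne : ¬ (('w' :: 'a' :: 'g' :: 'o' :: c :: rest).take 5 = motL) := by
      rw [take5_iff]; intro h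
      exact hc (by simpa [motChar] using h.2.2.2.2)
    show first? ('w' :: 'a' :: 'g' :: 'o' :: c :: rest) = (first? (c :: rest)).map (· + 4)
    rw [first?_cons, if_neg hne, head_ne 'a' _ (by decide), head_ne 'g' _ (by decide),
        head_ne 'o' _ (by decide)]
    cases first? (c :: rest) <;> simp

lemma autoB_eq : ∀ (l : List Char) (i : Int) (s : Nat), s ≤ 4 →
    autoB l i s =
      (match first? (motL.take s ++ l) with
       | none => -1
       | some k => i - s + k) := by
  intro l
  induction l with
  | nil =>
    intro i s hs
    have : first? (motL.take s ++ []) = none := by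
      apply first?_short
      simp [motL]
      omega
    rw [this]
    rfl
  | cons c rest ih =>
    intro i s hs
    unfold autoB
    by_cases hc : c = motChar s
    · rw [if_pos hc]
      by_cases h5 : s + 1 = 5
      · rw [if_pos h5]
        have hs4 : s = 4 := by omega
        subst hs4
        subst hc
        have hfst : first? (motL.take 4 ++ motChar 4 :: rest) = some 0 := by
          show first? ('w' :: 'a' :: 'g' :: 'o' :: 'n' :: rest) = some 0
          rw [first?_cons, if_pos (by simp [motL])]
        rw [hfst]
        simp
      · rw [if_neg h5]
        have heq : motL.take s ++ c :: rest = motL.take (s + 1) ++ rest := by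
          subst hc
          interval_cases s <;> simp [motL, motChar]
        rw [heq, ih (i + 1) (s + 1) (by omega)]
        cases first? (motL.take (s + 1) ++ rest) <;> simp
    · rw [if_neg hc]
      by_cases hw : c = 'w'
      · rw [if_pos hw]
        have hs1 : 1 ≤ s := by
          rcases Nat.eq_zero_or_pos s with h0 | h
          · exact absurd (by rw [h0] at hc ⊢; exact hw) hc
          · exact h
        rw [skip_prefix s hs1 hs c hc rest, ih (i + 1) 1 (by omega)]
        have h1 : motL.take 1 ++ rest = c :: rest := by rw [hw]; rfl
        rw [h1]
        cases first? (c :: rest) <;> simp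
      · rw [if_neg hw, ih (i + 1) 0 (by omega)]
        have h0 : motL.take 0 ++ rest = rest := rfl
        rw [h0]
        rcases Nat.eq_zero_or_pos s with hz | hp
        · subst hz
          have h0' : motL.take 0 ++ c :: rest = c :: rest := rfl
          rw [h0', head_ne c rest hw]
          cases first? rest <;> simp
          all_goals ring
        · rw [skip_prefix s hp hs c hc rest, head_ne c rest hw]
          cases first? rest <;> simp
          all_goals ring

-- ===== VERDICT (by name: the statement is the Claim_ definition above) =====
theorem premier_wagon_spec : Claim_equal_premier_wagon := by
  intro T _
  unfold Spec_premier_wagon premier_wagon premier_wagon_alt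
  rw [taille_eq]
  have hA := main_loop T.toList T.toList.length 0 (by omega)
  have hB := autoB_eq T.toList 0 0 (by omega)
  simp only [Nat.cast_zero, List.drop_zero] at hA
  have h0 : motL.take 0 ++ T.toList = T.toList := rfl
  rw [h0] at hB
  rw [hA, hB]
  cases first? T.toList <;> simp [encAt]
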